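-- pv_equiv track=rewrite | github.com/ezfrag2021/amazon-launchpad | services/ingredient_compliance.py | overall_status
-- ===== SOURCE A (Python) =====
-- from typing import Any
--
-- def overall_status(findings: list[dict[str, Any]]) -> str:
--     if not findings:
--         return "manual_review"
--
--     has_fail = any(
--         item.get("Outcome") in ("prohibited", "exceeds_limit") for item in findings
--     )
--     if has_fail:
--         return "fail"
--
--     has_manual = any(
--         item.get("Outcome") in ("unknown", "missing_concentration") for item in findings
--     )
--     if has_manual:
--         return "manual_review"
--
--     has_no_specific_rule = any(
--         item.get("Outcome") == "no_specific_rule" for item in findings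
--     )
--     if has_no_specific_rule:
--         return "conditional"
--
--     has_conditional = any(
--         item.get("Outcome") == "restricted_conditionally" for item in findings
--     )
--     if has_conditional:
--         return "conditional"
--
--     return "pass"
-- ===== SOURCE B (Python) =====
-- _PRIORITY = {
--     "prohibited": 3,
--     "exceeds_limit": 3,
--     "unknown": 2,
--     "missing_concentration": 2,
--     "no_specific_rule": 1,
--     "restricted_conditionally": 1,
-- }
--
-- _STATUS = {3: "fail", 2: "manual_review", 1: "conditional", 0: "pass"}
--
--
-- def overall_status(findings: list[dict[str, object]]) -> str:
--     if not findings: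
--         return "manual_review"
--     worst = 0
--     for item in findings:
--         r = _PRIORITY.get(item.get("Outcome"), 0)
--         if r > worst:
--             worst = r
--     return _STATUS[worst]
-- ===== Notes on version B (the rewrite author's own statement) =====
-- stated objective: simpler
-- what changed: Replaces A's four sequential any-scans and early returns by a severity-rank table: one pass takes the maximum rank of all findings and a final table lookup maps that rank to the status string.
import Mathlib
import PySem

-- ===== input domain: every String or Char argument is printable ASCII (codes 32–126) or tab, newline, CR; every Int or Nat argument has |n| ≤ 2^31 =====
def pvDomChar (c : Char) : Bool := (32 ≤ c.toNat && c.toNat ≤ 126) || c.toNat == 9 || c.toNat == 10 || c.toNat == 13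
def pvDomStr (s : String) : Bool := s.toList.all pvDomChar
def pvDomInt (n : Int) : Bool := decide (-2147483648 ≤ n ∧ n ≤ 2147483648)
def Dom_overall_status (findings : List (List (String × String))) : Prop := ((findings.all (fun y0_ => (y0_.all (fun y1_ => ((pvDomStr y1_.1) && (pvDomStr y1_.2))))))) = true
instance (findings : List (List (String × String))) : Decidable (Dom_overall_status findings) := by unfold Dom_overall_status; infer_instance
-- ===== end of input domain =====

-- B changes A's four sequential any-scans into a severity-rank table, one max-taking pass and a final rank→status lookup (objective: simpler).

-- ===== PORT A =====
-- item.get("Outcome") = first-match lookup on the association list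
def pvOutcome (item : List (String × String)) : Option String :=
  (PySem.Dict.mk item).get? "Outcome"

def overall_status (findings : List (List (String × String))) : String :=
  if findings.isEmpty then "manual_review"
  else if findings.any (fun item =>
      pvOutcome item == some "prohibited" || pvOutcome item == some "exceeds_limit") then "fail"
  else if findings.any (fun item =>
      pvOutcome item == some "unknown" || pvOutcome item == some "missing_concentration") then "manual_review"
  else if findings.any (fun item => pvOutcome item == some "no_specific_rule") then "conditional"
  else if findings.any (fun item => pvOutcome item == some "restricted_conditionally") then "conditional"
  else "pass"

-- ===== PORT B =====
def pvPriority : PySem.Dict String Int := PySem.Dict.mk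
  [("prohibited", 3), ("exceeds_limit", 3), ("unknown", 2), ("missing_concentration", 2),
   ("no_specific_rule", 1), ("restricted_conditionally", 1)]

def pvStatus : PySem.Dict Int String := PySem.Dict.mk
  [(3, "fail"), (2, "manual_review"), (1, "conditional"), (0, "pass")]

-- _PRIORITY.get(item.get("Outcome"), 0): a missing "Outcome" key (None) matches no string key, hence 0
def pvRank (item : List (String × String)) : Int :=
  match pvOutcome item with
  | none => 0
  | some o => pvPriority.getD o 0

def overall_status_alt (findings : List (List (String × String))) : String :=
  if findings.isEmpty then "manual_review"
  else  -- worst = the max rank; _STATUS[worst] (worst is always a key of _STATUS here)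
    (pvStatus.get? (findings.foldl (fun w item => let r := pvRank item; if r > w then r else w) 0)).getD ""

-- ===== PRECONDITION & SPEC =====
def Spec_overall_status (findings : List (List (String × String))) (out : String) : Prop := out = overall_status_alt findings
instance (findings : List (List (String × String))) (out : String) : Decidable (Spec_overall_status findings out) := by unfold Spec_overall_status; infer_instance

-- ===== CLAIM (what is proved, stated in full; the proofs are below) =====
def Claim_equal_overall_status : Prop := ∀ (findings : List (List (String × String))), Dom_overall_status findings → Spec_overall_status findings (overall_status findings)

-- ===== LEMMAS AND PROOFS =====

lemma pvRank_cases (item : List (String × String)) :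
    pvRank item = 0 ∨ pvRank item = 1 ∨ pvRank item = 2 ∨ pvRank item = 3 := by
  unfold pvRank
  cases h : pvOutcome item with
  | none => simp
  | some o =>
    simp only [pvPriority, PySem.Dict.getD_eq_get?_getD]
    by_cases h1 : "prohibited" = o
    · simp [PySem.Dict.get?_mk_cons, h1.symm]
    by_cases h2 : "exceeds_limit" = o
    · simp [PySem.Dict.get?_mk_cons, h1, h2.symm]
    by_cases h3 : "unknown" = o
    · simp [PySem.Dict.get?_mk_cons, h1, h2, h3.symm]
    by_cases h4 : "missing_concentration" = o
    · simp [PySem.Dict.get?_mk_cons, h1, h2, h3, h4.symm]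
    by_cases h5 : "no_specific_rule" = o
    · simp [PySem.Dict.get?_mk_cons, h1, h2, h3, h4, h5.symm]
    by_cases h6 : "restricted_conditionally" = o
    · simp [PySem.Dict.get?_mk_cons, h1, h2, h3, h4, h5, h6.symm]
    · simp [PySem.Dict.get?_mk_cons, PySem.Dict.get?, h1, h2, h3, h4, h5, h6]

lemma pvRank_eq_three_iff (item : List (String × String)) :
    pvRank item = 3 ↔ (pvOutcome item == some "prohibited" || pvOutcome item == some "exceeds_limit") = true := by
  unfold pvRank
  cases h : pvOutcome item with
  | none => simp
  | some o =>
    simp only [pvPriority, PySem.Dict.getD_eq_get?_getD]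
    by_cases h1 : "prohibited" = o
    · simp [PySem.Dict.get?_mk_cons, h1.symm]
    by_cases h2 : "exceeds_limit" = o
    · simp [PySem.Dict.get?_mk_cons, h1, h2.symm]
    by_cases h3 : "unknown" = o
    · simp [PySem.Dict.get?_mk_cons, h1, h2, h3.symm, Ne.symm h1, Ne.symm h2]
    by_cases h4 : "missing_concentration" = o
    · simp [PySem.Dict.get?_mk_cons, h1, h2, h3, h4.symm, Ne.symm h1, Ne.symm h2]
    by_cases h5 : "no_specific_rule" = o
    · simp [PySem.Dict.get?_mk_cons, h1, h2, h3, h4, h5.symm, Ne.symm h1, Ne.symm h2]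
    by_cases h6 : "restricted_conditionally" = o
    · simp [PySem.Dict.get?_mk_cons, h1, h2, h3, h4, h5, h6.symm, Ne.symm h1, Ne.symm h2]
    · simp [PySem.Dict.get?_mk_cons, PySem.Dict.get?, h1, h2, h3, h4, h5, h6]
      exact ⟨Ne.symm h1, Ne.symm h2⟩

lemma pvRank_eq_two_iff (item : List (String × String)) :
    pvRank item = 2 ↔ (pvOutcome item == some "unknown" || pvOutcome item == some "missing_concentration") = true := by
  unfold pvRank
  cases h : pvOutcome item with
  | none => simp
  | some o =>
    simp only [pvPriority, PySem.Dict.getD_eq_get?_getD]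
    by_cases h1 : "prohibited" = o
    · simp [PySem.Dict.get?_mk_cons, h1.symm]
    by_cases h2 : "exceeds_limit" = o
    · simp [PySem.Dict.get?_mk_cons, h1, h2.symm]
    by_cases h3 : "unknown" = o
    · simp [PySem.Dict.get?_mk_cons, h1, h2, h3.symm]
    by_cases h4 : "missing_concentration" = o
    · simp [PySem.Dict.get?_mk_cons, h1, h2, h3, h4.symm, Ne.symm h3]
    by_cases h5 : "no_specific_rule" = o
    · simp [PySem.Dict.get?_mk_cons, h1, h2, h3, h4, h5.symm, Ne.symm h3, Ne.symm h4]
    by_cases h6 : "restricted_conditionally" = o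
    · simp [PySem.Dict.get?_mk_cons, h1, h2, h3, h4, h5, h6.symm, Ne.symm h3, Ne.symm h4]
    · simp [PySem.Dict.get?_mk_cons, PySem.Dict.get?, h1, h2, h3, h4, h5, h6]
      exact ⟨Ne.symm h3, Ne.symm h4⟩

lemma pvRank_eq_one_iff (item : List (String × String)) :
    pvRank item = 1 ↔ ((pvOutcome item == some "no_specific_rule") = true ∨ (pvOutcome item == some "restricted_conditionally") = true) := by
  unfold pvRank
  cases h : pvOutcome item with
  | none => simp
  | some o =>
    simp only [pvPriority, PySem.Dict.getD_eq_get?_getD]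
    by_cases h1 : "prohibited" = o
    · simp [PySem.Dict.get?_mk_cons, h1.symm]
    by_cases h2 : "exceeds_limit" = o
    · simp [PySem.Dict.get?_mk_cons, h1, h2.symm]
    by_cases h3 : "unknown" = o
    · simp [PySem.Dict.get?_mk_cons, h1, h2, h3.symm]
    by_cases h4 : "missing_concentration" = o
    · simp [PySem.Dict.get?_mk_cons, h1, h2, h3, h4.symm]
    by_cases h5 : "no_specific_rule" = o
    · simp [PySem.Dict.get?_mk_cons, h1, h2, h3, h4, h5.symm]
    by_cases h6 : "restricted_conditionally" = o
    · simp [PySem.Dict.get?_mk_cons, h1, h2, h3, h4, h5, h6.symm, Ne.symm h5]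
    · simp [PySem.Dict.get?_mk_cons, PySem.Dict.get?, h1, h2, h3, h4, h5, h6]
      exact ⟨Ne.symm h5, Ne.symm h6⟩

-- the fold step of B
def pvStep (w : Int) (item : List (String × String)) : Int :=
  if pvRank item > w then pvRank item else w

lemma pvFold_ge (l : List (List (String × String))) (w : Int) : w ≤ l.foldl pvStep w := by
  induction l generalizing w with
  | nil => simp
  | cons x xs ih =>
    simp only [List.foldl_cons]
    refine le_trans ?_ (ih (pvStep w x))
    unfold pvStep
    split <;> omega

lemma pvFold_mem_le (l : List (List (String × String))) (w : Int) (item : List (String × String))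
    (h : item ∈ l) : pvRank item ≤ l.foldl pvStep w := by
  induction l generalizing w with
  | nil => cases h
  | cons x xs ih =>
    simp only [List.foldl_cons]
    rcases List.mem_cons.mp h with h | h
    · subst h
      refine le_trans ?_ (pvFold_ge xs (pvStep w item))
      unfold pvStep; split <;> omega
    · exact ih (pvStep w x) h

lemma pvFold_eq_or_mem (l : List (List (String × String))) (w : Int) :
    l.foldl pvStep w = w ∨ ∃ item ∈ l, l.foldl pvStep w = pvRank item := by
  induction l generalizing w with
  | nil => left; rfl
  | cons x xs ih =>
    simp only [List.foldl_cons]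
    rcases ih (pvStep w x) with h | ⟨it, hmem, heq⟩
    · rw [h]
      unfold pvStep
      split
      · right; exact ⟨x, List.mem_cons_self, rfl⟩
      · left; rfl
    · right; exact ⟨it, List.mem_cons_of_mem _ hmem, heq⟩

lemma pvFold_le_three (l : List (List (String × String))) : l.foldl pvStep 0 ≤ 3 := by
  rcases pvFold_eq_or_mem l 0 with h | ⟨it, _, h⟩
  · omega
  · rcases pvRank_cases it with h' | h' | h' | h' <;> omega

lemma pvFold_eq_rank (l : List (List (String × String))) (k : Int) (hk : 0 < k)
    (h : l.foldl pvStep 0 = k) : ∃ item ∈ l, pvRank item = k := by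
  rcases pvFold_eq_or_mem l 0 with h' | ⟨it, hmem, h'⟩
  · omega
  · exact ⟨it, hmem, by omega⟩

-- ===== VERDICT (by name: the statement is the Claim_ definition above) =====
theorem overall_status_spec : Claim_equal_overall_status := by
  intro findings _
  unfold Spec_overall_status overall_status overall_status_alt
  by_cases hemp : findings.isEmpty
  · simp only [hemp, if_true]
  simp only [if_neg hemp]
  have hfold : findings.foldl (fun w item => let r := pvRank item; if r > w then r else w) 0
      = findings.foldl pvStep 0 := rfl
  rw [hfold]
  set m := findings.foldl pvStep 0 with hm
  have hub : ∀ item ∈ findings, pvRank item ≤ m := fun it h => pvFold_mem_le findings 0 it h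
  have hlb : 0 ≤ m := pvFold_ge findings 0
  have hle : m ≤ 3 := pvFold_le_three findings
  by_cases h3 : (findings.any (fun item =>
      pvOutcome item == some "prohibited" || pvOutcome item == some "exceeds_limit")) = true
  · rcases List.any_eq_true.mp h3 with ⟨it, hmem, hit⟩
    have : pvRank it = 3 := (pvRank_eq_three_iff it).mpr (by simpa using hit)
    have hm3 : m = 3 := le_antisymm hle (this ▸ hub it hmem)
    rw [if_pos h3, hm3]; rfl
  have hne3 : ∀ it ∈ findings, pvRank it ≠ 3 := by
    intro it hmem hc
    exact h3 (List.any_eq_true.mpr ⟨it, hmem, by simpa using (pvRank_eq_three_iff it).mp hc⟩)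
  have hle2 : m ≤ 2 := by
    by_contra hc
    rcases pvFold_eq_rank findings 3 (by omega) (by omega) with ⟨it, hmem, hit⟩
    exact hne3 it hmem hit
  rw [if_neg h3]
  by_cases h2 : (findings.any (fun item =>
      pvOutcome item == some "unknown" || pvOutcome item == some "missing_concentration")) = true
  · rcases List.any_eq_true.mp h2 with ⟨it, hmem, hit⟩
    have : pvRank it = 2 := (pvRank_eq_two_iff it).mpr (by simpa using hit)
    have hm2 : m = 2 := le_antisymm hle2 (this ▸ hub it hmem)
    rw [if_pos h2, hm2]; rfl
  have hne2 : ∀ it ∈ findings, pvRank it ≠ 2 := by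
    intro it hmem hc
    exact h2 (List.any_eq_true.mpr ⟨it, hmem, by simpa using (pvRank_eq_two_iff it).mp hc⟩)
  have hle1 : m ≤ 1 := by
    by_contra hc
    rcases pvFold_eq_rank findings 2 (by omega) (by omega) with ⟨it, hmem, hit⟩
    exact hne2 it hmem hit
  rw [if_neg h2]
  by_cases h1a : (findings.any (fun item => pvOutcome item == some "no_specific_rule")) = true
  · rcases List.any_eq_true.mp h1a with ⟨it, hmem, hit⟩
    have : pvRank it = 1 := (pvRank_eq_one_iff it).mpr (Or.inl (by simpa using hit))
    have hm1 : m = 1 := le_antisymm hle1 (this ▸ hub it hmem)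
    rw [if_pos h1a, hm1]; rfl
  rw [if_neg h1a]
  by_cases h1b : (findings.any (fun item => pvOutcome item == some "restricted_conditionally")) = true
  · rcases List.any_eq_true.mp h1b with ⟨it, hmem, hit⟩
    have : pvRank it = 1 := (pvRank_eq_one_iff it).mpr (Or.inr (by simpa using hit))
    have hm1 : m = 1 := le_antisymm hle1 (this ▸ hub it hmem)
    rw [if_pos h1b, hm1]; rfl
  · have hne1 : ∀ it ∈ findings, pvRank it ≠ 1 := by
      intro it hmem hc
      rcases (pvRank_eq_one_iff it).mp hc with h | h
      · exact h1a (List.any_eq_true.mpr ⟨it, hmem, by simpa using h⟩)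
      · exact h1b (List.any_eq_true.mpr ⟨it, hmem, by simpa using h⟩)
    have hm0 : m = 0 := by
      by_contra hc
      rcases pvFold_eq_rank findings 1 (by omega) (by omega) with ⟨it, hmem, hit⟩
      exact hne1 it hmem hit
    rw [if_neg h1b, hm0]; rfl
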